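-- pv_equiv track=rewrite | github.com/olivertzeng/homework | english/sort/ai.py | sort_lines
-- ===== SOURCE A (Python) =====
-- def sort_lines(lines):
--     """Sort lines based on the nth word."""
--     n = 1
--     while True:
--         words = [line.split()[n] for line in lines if n < len(line.split())]
--         if words:
--             lines.sort(key=lambda x: x.split()[n] if n < len(x.split()) else "")
--             n += 1
--         else:
--             break
--     return lines
-- ===== SOURCE B (Python) =====
-- def sort_lines(lines):
--     """Sort lines based on the nth word."""
--     m = 0
--     pairs = []
--     for line in lines:
--         words = line.split()
--         m = max(m, len(words))
--         pairs.append((words, line))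
--     pairs.sort(key=lambda p: tuple(p[0][n] if n < len(p[0]) else ""
--                                    for n in range(m - 1, 0, -1)))
--     lines[:] = [line for _, line in pairs]
--     return lines
-- ===== Notes on version B (the rewrite author's own statement) =====
-- stated objective: alternative
-- what changed: A repeatedly stable-sorts the whole list once per word position, re-splitting every line on each pass; B splits each line once, builds for each line a single reversed word-position key tuple padded with '', and does ONE stable sort by that tuple.
import Mathlib
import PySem

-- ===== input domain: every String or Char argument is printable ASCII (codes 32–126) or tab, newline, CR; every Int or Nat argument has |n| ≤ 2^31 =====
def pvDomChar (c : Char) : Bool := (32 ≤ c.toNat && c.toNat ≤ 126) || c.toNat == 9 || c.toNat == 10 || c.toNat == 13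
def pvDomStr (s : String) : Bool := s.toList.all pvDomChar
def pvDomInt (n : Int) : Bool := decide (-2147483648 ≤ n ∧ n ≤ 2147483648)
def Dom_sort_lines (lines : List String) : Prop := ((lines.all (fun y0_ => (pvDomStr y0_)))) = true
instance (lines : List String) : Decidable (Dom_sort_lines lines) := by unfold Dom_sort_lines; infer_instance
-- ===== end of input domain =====

-- ===== PORT A =====
-- A: while-loop repeatedly stable-sorting by the n-th word; the Nat fuel (max word
-- count + 1) is only a totality guard — the loop in Python exits by the same test.
-- In-place note: both Pythons mutate `lines` to the same final content; the theorem
-- below is about the returned value.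
def pvKeyA (n : Nat) (x : String) : String :=
  let ws := PySem.Str.split₀ x
  if n < ws.length then ws.getD n "" else ""    -- x.split()[n] if n < len(x.split()) else ""; index n is in range here

def pvMaxLen (cur : List String) : Nat :=
  (cur.map (fun l => (PySem.Str.split₀ l).length)).foldl max 0

def sortLoop : Nat → Nat → List String → List String
  | 0, _, cur => cur
  | fuel+1, n, cur =>
    let words := (cur.filter (fun line => decide (n < (PySem.Str.split₀ line).length))).map
        (fun line => (PySem.Str.split₀ line).getD n "")
    if words ≠ [] then
      sortLoop fuel (n+1) (PySem.List.sorted cur (pvKeyA n))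
    else cur

def sort_lines (lines : List String) : List String :=
  sortLoop (pvMaxLen lines + 1) 1 lines

-- ===== PORT B =====
-- pvRevRange k = range(k, 0, -1) = [k, k-1, ..., 1]  (exact: all its values are ≥ 1)
def pvRevRange : Nat → List Nat
  | 0 => []
  | k+1 => (k+1) :: pvRevRange k

-- the key tuple: p[0][n] if n < len(p[0]) else ""  for n in range(m-1, 0, -1)
def pvKeyB (m : Nat) (ws : List String) : List String :=
  (pvRevRange (m - 1)).map (fun n => if n < ws.length then ws.getD n "" else "")

def sort_lines_alt (lines : List String) : List String :=
  let st := lines.foldl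
      (fun (acc : Nat × List (List String × String)) line =>
        let ws := PySem.Str.split₀ line
        (max acc.1 ws.length, acc.2 ++ [(ws, line)])) (0, [])
  (PySem.List.sorted st.2 (fun p => pvKeyB st.1 p.1)).map (fun p => p.2)

-- ===== PRECONDITION & SPEC =====
def Spec_sort_lines (lines : List String) (out : List String) : Prop := out = sort_lines_alt lines
instance (lines : List String) (out : List String) : Decidable (Spec_sort_lines lines out) := by unfold Spec_sort_lines; infer_instance

-- ===== CLAIM (what is proved, stated in full; the proofs are below) =====
def Claim_equal_sort_lines : Prop := ∀ (lines : List String), Dom_sort_lines lines → Spec_sort_lines lines (sort_lines lines)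

-- ===== LEMMAS AND PROOFS =====

-- `pvS` is `PySem.List.sorted` at a `List String`-valued key with the order
-- instances spelled exactly as Mathlib lemmas instantiate them.
def pvS {α : Type} (xs : List α) (key : α → List String) : List α :=
  @PySem.List.sorted α (List String)
    (@Preorder.toLT (List String)
      (@PartialOrder.toPreorder (List String)
        (@LinearOrder.toPartialOrder (List String) (@List.instLinearOrder String String.instLinearOrder))))
    (@LinearOrder.toDecidableLT (List String) (@List.instLinearOrder String String.instLinearOrder)) xs key false

-- sorted does not depend on which Decidable instance decides <
theorem pv_sorted_deceq {α κ : Type} [i : LT κ] (d1 d2 : @DecidableLT κ i)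
    (xs : List α) (key : α → κ) :
    @PySem.List.sorted α κ i d1 xs key false = @PySem.List.sorted α κ i d2 xs key false := by
  have h : d1 = d2 := by funext a b; exact Subsingleton.elim _ _
  rw [h]

theorem pv_sorted_to_pvS {α : Type} (xs : List α) (key : α → List String) :
    PySem.List.sorted xs key = pvS xs key :=
  pv_sorted_deceq _ _ xs key

-- sorted over a snoc: insert the last element into the sorted prefix
theorem pv_sorted_snoc {α κ : Type} [LT κ] [DecidableLT κ] (xs : List α) (x : α) (key : α → κ) :
    PySem.List.sorted (xs ++ [x]) key =
      PySem.List.insertBy (fun a b => decide (key a < key b)) x (PySem.List.sorted xs key) := by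
  rw [PySem.List.sorted_eq_foldl_insertBy, PySem.List.sorted_eq_foldl_insertBy, List.foldl_append]
  rfl

-- insertBy commutes with map when the comparison factors through the map
theorem pv_insertBy_map {α β : Type} (b : β → β → Bool) (f : α → β) (x : α) (M : List α) :
    PySem.List.insertBy b (f x) (M.map f) =
      (PySem.List.insertBy (fun a c => b (f a) (f c)) x M).map f := by
  induction M with
  | nil => simp [PySem.List.insertBy]
  | cons y M ih =>
    simp only [List.map_cons, PySem.List.insertBy]
    by_cases h : b (f x) (f y) = true
    · simp [h]
    · simp [h, ih]

-- sorting a mapped list = mapping the sort by the composed key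
theorem pv_sorted_map {α β κ : Type} [LT κ] [DecidableLT κ] (f : α → β) (xs : List α) (key : β → κ) :
    PySem.List.sorted (xs.map f) key = (PySem.List.sorted xs (fun x => key (f x))).map f := by
  induction xs using List.reverseRecOn with
  | nil => rfl
  | append_singleton xs x ih =>
    rw [List.map_append, List.map_singleton, pv_sorted_snoc, pv_sorted_snoc, ih, pv_insertBy_map]

-- filtering one key-class out of an insertion into a key-sorted list
theorem pv_filter_insertBy {α κ : Type} [LinearOrder κ] (dEq : DecidableEq κ) (key : α → κ) (v : κ) (x : α)
    (M : List α) (hM : M.Pairwise (fun a b => key a ≤ key b)) :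
    (PySem.List.insertBy (fun a b => decide (key a < key b)) x M).filter
        (fun y => @decide (key y = v) (dEq (key y) v)) =
      if key x = v then M.filter (fun y => @decide (key y = v) (dEq (key y) v)) ++ [x]
      else M.filter (fun y => @decide (key y = v) (dEq (key y) v)) := by
  induction M with
  | nil =>
    simp only [PySem.List.insertBy, List.filter]
    by_cases h : key x = v <;> simp [h]
  | cons y M ih =>
    rcases List.pairwise_cons.mp hM with ⟨hy, hM'⟩
    simp only [PySem.List.insertBy]
    by_cases hlt : key x < key y
    · simp only [hlt, decide_true, if_true]
      by_cases hxv : key x = v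
      · -- every element of y :: M has key > key x = v, so the old filter is empty
        have hempty : (y :: M).filter (fun z => @decide (key z = v) (dEq (key z) v)) = [] := by
          rw [List.filter_eq_nil_iff]
          intro z hz
          have : key x < key z := by
            rcases hz with _ | hz
            · exact hlt
            · exact lt_of_lt_of_le hlt (hy z (by assumption))
          simp only [decide_eq_true_eq]
          intro hzv; rw [← hxv] at hzv; exact absurd hzv (ne_of_gt this)
        rw [hempty]
        simp only [hxv, if_true, List.nil_append]
        rw [show (x :: y :: M).filter (fun z => @decide (key z = v) (dEq (key z) v)) =
              (x :: []).filter (fun z => @decide (key z = v) (dEq (key z) v)) ++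
                (y :: M).filter (fun z => @decide (key z = v) (dEq (key z) v)) from
          (List.filter_append _ _ ▸ rfl), hempty]
        simp [hxv]
      · simp only [hxv, if_false]
        simp [List.filter_cons, hxv]
    · simp only [hlt, decide_false, Bool.false_eq_true, if_false]
      rw [List.filter_cons, List.filter_cons]
      by_cases hyv : key y = v
      · simp only [hyv, decide_true, if_true]
        rw [ih hM']
        by_cases hxv : key x = v <;> simp [hxv]
      · simp only [hyv, decide_false, Bool.false_eq_true, if_false]
        exact ih hM'

-- STABILITY: a stable sort keeps each key-class in input order
theorem pv_sorted_filter {α κ : Type} [LinearOrder κ] (dEq : DecidableEq κ) (key : α → κ) (v : κ) (xs : List α) :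
    (PySem.List.sorted xs key).filter (fun y => @decide (key y = v) (dEq (key y) v)) =
      xs.filter (fun y => @decide (key y = v) (dEq (key y) v)) := by
  induction xs using List.reverseRecOn with
  | nil => rfl
  | append_singleton xs x ih =>
    rw [pv_sorted_snoc, pv_filter_insertBy dEq key v x _ (PySem.List.sorted_pairwise xs key),
      List.filter_append, ih]
    by_cases h : key x = v <;> simp [h]

-- UNIQUENESS: two key-ordered lists with identical key-classes are equal
theorem pv_unique {α κ : Type} [LinearOrder κ] (dEq : DecidableEq κ) (key : α → κ) :
    ∀ (l₁ l₂ : List α), l₁.Pairwise (fun a b => key a ≤ key b) →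
      l₂.Pairwise (fun a b => key a ≤ key b) →
      (∀ v, l₁.filter (fun y => @decide (key y = v) (dEq (key y) v)) =
        l₂.filter (fun y => @decide (key y = v) (dEq (key y) v))) →
      l₁ = l₂ := by
  intro l₁
  induction l₁ with
  | nil =>
    intro l₂ _ _ hf
    cases l₂ with
    | nil => rfl
    | cons b t₂ =>
      have := hf (key b)
      simp at this
  | cons a t₁ ih =>
    intro l₂ h₁ h₂ hf
    rcases List.pairwise_cons.mp h₁ with ⟨ha, ht₁⟩
    cases l₂ with
    | nil =>
      have := hf (key a)
      simp at this
    | cons b t₂ =>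
      rcases List.pairwise_cons.mp h₂ with ⟨hb, ht₂⟩
      have hab : key a = key b := by
        have h1 : List.filter (fun y => @decide (key y = key a) (dEq (key y) (key a))) (b :: t₂) ≠ [] := by
          rw [← hf (key a)]; simp
        have h2 : List.filter (fun y => @decide (key y = key b) (dEq (key y) (key b))) (a :: t₁) ≠ [] := by
          rw [hf (key b)]; simp
        have e1 : ∃ z ∈ b :: t₂, key z = key a := by
          by_contra hcon
          push Not at hcon
          exact h1 (List.filter_eq_nil_iff.mpr (by intro z hz; simpa using hcon z hz))
        have e2 : ∃ z ∈ a :: t₁, key z = key b := by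
          by_contra hcon
          push Not at hcon
          exact h2 (List.filter_eq_nil_iff.mpr (by intro z hz; simpa using hcon z hz))
        obtain ⟨z1, hz1, hkz1⟩ := e1
        obtain ⟨z2, hz2, hkz2⟩ := e2
        have hba : key b ≤ key a := by
          rcases List.mem_cons.mp hz1 with h | h
          · rw [← hkz1, h]
          · exact hkz1 ▸ hb z1 h
        have hab' : key a ≤ key b := by
          rcases List.mem_cons.mp hz2 with h | h
          · rw [← hkz2, h]
          · exact hkz2 ▸ ha z2 h
        exact le_antisymm hab' hba
      have h1 := hf (key a)
      rw [List.filter_cons, List.filter_cons] at h1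
      simp only [decide_eq_true_eq, ← hab] at h1
      injection h1 with hhead htail
      have htails : t₁ = t₂ := by
        refine ih t₂ ht₁ ht₂ ?_
        intro v
        have hv := hf v
        rw [List.filter_cons, List.filter_cons] at hv
        by_cases hva : key a = v
        · simp only [decide_eq_true_eq, hva, ← hab] at hv
          injection hv
        · have hvb : ¬ (key b = v) := by rw [← hab]; exact hva
          simp only [decide_eq_true_eq, hva, hvb, if_false] at hv
          exact hv
      rw [hhead, htails]

-- pairwise for the cons-key from pairwise on the head key and on each key-class
theorem pv_pairwise_cons_key {α κ : Type} [LinearOrder κ] (dEq : DecidableEq κ) (k : α → κ) (kv : α → List κ)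
    (l : List α) (hk : l.Pairwise (fun a b => k a ≤ k b))
    (hv : ∀ v, (l.filter (fun y => @decide (k y = v) (dEq (k y) v))).Pairwise (fun a b => kv a ≤ kv b)) :
    l.Pairwise (fun a b => (k a :: kv a) ≤ (k b :: kv b)) := by
  induction l with
  | nil => exact List.Pairwise.nil
  | cons a t ih =>
    rcases List.pairwise_cons.mp hk with ⟨ha, ht⟩
    refine List.pairwise_cons.mpr ⟨?_, ?_⟩
    · intro b hb
      rcases lt_or_eq_of_le (ha b hb) with hlt | heq
      · exact le_of_lt (List.cons_lt_cons_iff.mpr (Or.inl hlt))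
      · -- equal heads: use the key-class pairwise at v = k a
        have hfa := hv (k a)
        have heq2 : (a :: t).filter (fun y => @decide (k y = k a) (dEq (k y) (k a))) =
            a :: t.filter (fun y => @decide (k y = k a) (dEq (k y) (k a))) := by
          simp
        rw [heq2] at hfa
        rcases List.pairwise_cons.mp hfa with ⟨ha2, _⟩
        have hbmem : b ∈ t.filter (fun y => @decide (k y = k a) (dEq (k y) (k a))) :=
          List.mem_filter.mpr ⟨hb, by simp [heq]⟩
        have hle : kv a ≤ kv b := ha2 b hbmem
        rcases lt_or_eq_of_le hle with hlt | heqv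
        · exact le_of_lt (List.cons_lt_cons_iff.mpr (Or.inr ⟨heq, hlt⟩))
        · exact le_of_eq (by rw [heq, heqv])
    · refine ih ht ?_
      intro v
      have hfa := hv v
      by_cases hav : k a = v
      · have heq2 : (a :: t).filter (fun y => @decide (k y = v) (dEq (k y) v)) =
            a :: t.filter (fun y => @decide (k y = v) (dEq (k y) v)) := by
          simp [hav]
        rw [heq2] at hfa
        exact (List.pairwise_cons.mp hfa).2
      · have heq2 : (a :: t).filter (fun y => @decide (k y = v) (dEq (k y) v)) =
            t.filter (fun y => @decide (k y = v) (dEq (k y) v)) := by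
          simp [hav]
        rw [heq2] at hfa
        exact hfa

-- RADIX STEP: re-sorting a stable sort refines the key on the left
theorem pv_radix {α : Type} (dEqS : DecidableEq String) (dEqL : DecidableEq (List String))
    (k : α → String) (kv : α → List String) (xs : List α) :
    PySem.List.sorted (pvS xs kv) k = pvS xs (fun x => k x :: kv x) := by
  unfold pvS
  apply pv_unique dEqL (fun x => k x :: kv x)
  · apply pv_pairwise_cons_key dEqS k kv
    · exact PySem.List.sorted_pairwise _ k
    · intro v
      have hst : (PySem.List.sorted (pvS xs kv) k).filter (fun y => @decide (k y = v) (dEqS (k y) v)) =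
          (pvS xs kv).filter (fun y => @decide (k y = v) (dEqS (k y) v)) :=
        pv_sorted_filter dEqS k v (pvS xs kv)
      unfold pvS at hst
      rw [hst]
      have hpw : (pvS xs kv).Pairwise (fun a b => kv a ≤ kv b) := by
        unfold pvS; exact PySem.List.sorted_pairwise xs kv
      unfold pvS at hpw
      exact List.Pairwise.sublist (List.filter_sublist) hpw
  · exact PySem.List.sorted_pairwise _ _
  · intro v
    cases v with
    | nil =>
      rw [List.filter_eq_nil_iff.mpr (by intro z _; simp),
          List.filter_eq_nil_iff.mpr (by intro z _; simp)]
    | cons w ws =>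
      -- right side: stability of the single sort by the cons-key
      have hR : (@PySem.List.sorted α (List String)
            (@Preorder.toLT (List String)
              (@PartialOrder.toPreorder (List String)
                (@LinearOrder.toPartialOrder (List String) (@List.instLinearOrder String String.instLinearOrder))))
            (@LinearOrder.toDecidableLT (List String) (@List.instLinearOrder String String.instLinearOrder))
            xs (fun x => k x :: kv x) false).filter
            (fun y => @decide ((k y :: kv y) = w :: ws) (dEqL (k y :: kv y) (w :: ws))) =
          xs.filter (fun y => @decide ((k y :: kv y) = w :: ws) (dEqL (k y :: kv y) (w :: ws))) := by
        exact pv_sorted_filter dEqL (fun x => k x :: kv x) (w :: ws) xs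
      rw [hR]
      -- left side: split the cons-key class into the two component classes
      have hsplit : ∀ (l : List α),
          l.filter (fun y => @decide ((k y :: kv y) = w :: ws) (dEqL (k y :: kv y) (w :: ws))) =
            (l.filter (fun y => @decide (kv y = ws) (dEqL (kv y) ws))).filter
              (fun y => @decide (k y = w) (dEqS (k y) w)) := by
        intro l
        rw [List.filter_filter]
        refine List.filter_congr (fun x _ => ?_)
        by_cases h1 : k x = w <;> by_cases h2 : kv x = ws <;> simp [h1, h2]
      rw [hsplit, hsplit]
      -- commute the two filters and peel the two sorts with stability
      rw [List.filter_comm]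
      have h1 : (PySem.List.sorted (pvS xs kv) k).filter (fun y => @decide (k y = w) (dEqS (k y) w)) =
          (pvS xs kv).filter (fun y => @decide (k y = w) (dEqS (k y) w)) :=
        pv_sorted_filter dEqS k w (pvS xs kv)
      unfold pvS at h1
      rw [h1, List.filter_comm]
      have h2 : (pvS xs kv).filter (fun y => @decide (kv y = ws) (dEqL (kv y) ws)) =
          xs.filter (fun y => @decide (kv y = ws) (dEqL (kv y) ws)) :=
        pv_sorted_filter dEqL kv ws xs
      unfold pvS at h2
      rw [h2]

theorem pv_sorted_const_nil {α : Type} (xs : List α) :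
    pvS xs (fun _ => ([] : List String)) = xs := by
  unfold pvS
  exact PySem.List.sorted_eq_self_of_pairwise _ _
    (List.pairwise_of_forall_sublist (fun _ => le_refl _))

-- the chain of sorts for n = 1..j is the single sort by the reversed key list
theorem pv_chain (j : Nat) (cur : List String) :
    (List.range' 1 j).foldl (fun c i => PySem.List.sorted c (pvKeyA i)) cur =
      pvS cur (fun x => (pvRevRange j).map (fun n => pvKeyA n x)) := by
  induction j with
  | zero =>
    simp only [List.range', List.foldl_nil, pvRevRange, List.map_nil]
    exact (pv_sorted_const_nil cur).symm
  | succ j ih =>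
    rw [List.range'_concat, List.foldl_append, List.foldl_cons, List.foldl_nil, ih,
      pv_radix inferInstance inferInstance]
    have heq : (fun x => pvKeyA (1 + 1 * j) x :: (pvRevRange j).map (fun n => pvKeyA n x)) =
        fun x => (pvRevRange (j + 1)).map (fun n => pvKeyA n x) := by
      funext x
      simp [pvRevRange, Nat.add_comm]
    rw [heq]

theorem pv_maxLen_perm {c₁ c₂ : List String} (h : c₁.Perm c₂) : pvMaxLen c₁ = pvMaxLen c₂ := by
  unfold pvMaxLen
  exact List.Perm.foldl_eq (rcomm := ⟨fun b a c => Nat.max_right_comm b a c⟩) (h.map _) 0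

-- the loop of A unrolled: with enough fuel it performs the sorts for n, n+1, ..., pvMaxLen cur - 1
theorem pv_loop (fuel : Nat) : ∀ (n : Nat) (cur : List String), 0 < n → pvMaxLen cur ≤ n + fuel →
    sortLoop fuel n cur =
      (List.range' n (pvMaxLen cur - n)).foldl (fun c i => PySem.List.sorted c (pvKeyA i)) cur := by
  induction fuel with
  | zero =>
    intro n cur hn hb
    rw [show pvMaxLen cur - n = 0 from by omega]
    rfl
  | succ fuel ih =>
    intro n cur hn hb
    have hstep : sortLoop (fuel+1) n cur =
        if ((cur.filter (fun line => decide (n < (PySem.Str.split₀ line).length))).map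
            (fun line => (PySem.Str.split₀ line).getD n "") ≠ []) then
          sortLoop fuel (n+1) (PySem.List.sorted cur (pvKeyA n))
        else cur := rfl
    have hex : (∃ l ∈ cur, n < (PySem.Str.split₀ l).length) ↔ n < pvMaxLen cur := by
      unfold pvMaxLen
      constructor
      · rintro ⟨l, hl, hlen⟩
        have := (PySem.List.le_foldl_max (cur.map (fun l => (PySem.Str.split₀ l).length)) 0).2
          ((PySem.Str.split₀ l).length) (List.mem_map_of_mem hl)
        omega
      · intro h
        rcases PySem.List.foldl_max_mem (cur.map (fun l => (PySem.Str.split₀ l).length)) 0 with h0 | hm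
        · omega
        · rcases List.mem_map.mp hm with ⟨l, hl, hlen⟩
          exact ⟨l, hl, by omega⟩
    by_cases hcond : n < pvMaxLen cur
    · obtain ⟨l, hl, hlen⟩ := hex.mpr hcond
      have hne : (cur.filter fun line => decide (n < (PySem.Str.split₀ line).length)) ≠ [] := by
        rw [Ne, List.filter_eq_nil_iff]
        push Not
        exact ⟨l, hl, by simpa using hlen⟩
      have hne2 : ((cur.filter (fun line => decide (n < (PySem.Str.split₀ line).length))).map
          (fun line => (PySem.Str.split₀ line).getD n "") ≠ []) := by
        rw [Ne, List.map_eq_nil_iff]; exact hne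
      rw [hstep, if_pos hne2]
      have hperm : pvMaxLen (PySem.List.sorted cur (pvKeyA n)) = pvMaxLen cur :=
        pv_maxLen_perm (PySem.List.sorted_perm cur (pvKeyA n) false)
      rw [ih (n+1) _ (by omega) (by rw [hperm]; omega), hperm,
        show pvMaxLen cur - n = (pvMaxLen cur - (n+1)) + 1 from by omega,
        List.range'_succ, List.foldl_cons]
    · have hfil : (cur.filter fun line => decide (n < (PySem.Str.split₀ line).length)) = [] := by
        rw [List.filter_eq_nil_iff]
        intro z hz
        simp only [decide_eq_true_eq]
        intro hlen
        exact hcond (hex.mp ⟨z, hz, hlen⟩)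
      rw [hstep, if_neg (by simp [hfil]), show pvMaxLen cur - n = 0 from by omega]
      rfl

-- B's accumulator fold, split into its two components
theorem pv_fold_spec (lines : List String) :
    ∀ (m : Nat) (acc : List (List String × String)),
      lines.foldl
        (fun (acc : Nat × List (List String × String)) line =>
          let ws := PySem.Str.split₀ line
          (max acc.1 ws.length, acc.2 ++ [(ws, line)])) (m, acc) =
      ((lines.map (fun l => (PySem.Str.split₀ l).length)).foldl max m,
        acc ++ lines.map (fun l => (PySem.Str.split₀ l, l))) := by
  induction lines with
  | nil => simp
  | cons l t ih => intro m acc; simp only [List.foldl_cons, List.map_cons, ih]; simp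

-- ===== VERDICT (by name: the statement is the Claim_ definition above) =====
theorem sort_lines_spec : Claim_equal_sort_lines := by
  intro lines _
  show sort_lines lines = sort_lines_alt lines
  -- B side
  have hB : sort_lines_alt lines =
      pvS lines (fun x => (pvRevRange (pvMaxLen lines - 1)).map (fun n => pvKeyA n x)) := by
    show (PySem.List.sorted _ _).map _ = _
    rw [pv_fold_spec]
    have h2 : (lines.map (fun l => (PySem.Str.split₀ l).length)).foldl max 0 = pvMaxLen lines := rfl
    rw [h2]
    simp only [List.nil_append]
    rw [pv_sorted_map (fun l => (PySem.Str.split₀ l, l)) lines (fun p => pvKeyB (pvMaxLen lines) p.1)]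
    rw [List.map_map]
    have h3 : (fun l => pvKeyB (pvMaxLen lines) (PySem.Str.split₀ l)) =
        (fun x => (pvRevRange (pvMaxLen lines - 1)).map (fun n => pvKeyA n x)) := by
      funext l; simp [pvKeyB, pvKeyA]
    rw [show ((fun p => p.2) ∘ fun l => (PySem.Str.split₀ l, l) : String → String) = id from rfl]
    rw [List.map_id, h3, pv_sorted_to_pvS]
  -- A side
  have hA : sort_lines lines =
      (List.range' 1 (pvMaxLen lines - 1)).foldl (fun c i => PySem.List.sorted c (pvKeyA i)) lines := by
    show sortLoop (pvMaxLen lines + 1) 1 lines = _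
    exact pv_loop _ 1 lines (by omega) (by omega)
  rw [hA, hB, pv_chain]
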